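-- pv_equiv track=rewrite | github.com/MusicOnline/Advent-of-Code-2018 | day5.py | part1
-- ===== SOURCE A (Python) =====
-- from string import ascii_lowercase
-- from typing import List
--
-- def part1(parsed_question: List[str]) -> int:
--     """The polymer is formed by smaller units which, when triggered, react with
--     each other such that two adjacent units of the same type and opposite
--     polarity are destroyed. Units' types are represented by letters; units'
--     polarity is represented by capitalization.
--
--     How many units remain after fully reacting the polymer you scanned?
--     """
--     while True:
--         to_pop: List[int] = []
--         for i in range(len(parsed_question) - 1):
--             left = parsed_question[i]
--             right = parsed_question[i + 1]
--             if left in ascii_lowercase and left.upper() == right: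
--                 if i not in to_pop and i + 1 not in to_pop:
--                     to_pop.extend([i, i + 1])
--             elif left not in ascii_lowercase and left.lower() == right:
--                 if i not in to_pop and i + 1 not in to_pop:
--                     to_pop.extend([i, i + 1])
--
--         if not to_pop:
--             return len(parsed_question)
--
--         to_pop.sort(reverse=True)
--         for i in to_pop:
--             parsed_question.pop(i)
-- ===== SOURCE B (Python) =====
-- from string import ascii_lowercase
-- from typing import List
--
--
-- def part1(parsed_question: List[str]) -> int:
--     """Single left-to-right pass with a stack: push each unit; when the
--     incoming unit reacts with the unit on top of the stack, the pair is
--     destroyed (pop instead of push).  Unlike A, the input list is not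
--     mutated."""
--     stack: List[str] = []
--     for unit in parsed_question:
--         if stack:
--             top = stack[-1]
--             if top in ascii_lowercase:
--                 reacts = top.upper() == unit
--             else:
--                 reacts = top.lower() == unit
--             if reacts:
--                 stack.pop()
--                 continue
--         stack.append(unit)
--     return len(stack)
-- ===== Notes on version B (the rewrite author's own statement) =====
-- stated objective: faster
-- what changed: Replaces A's repeated mark-and-pop full passes (an index list with linear membership tests, re-scanned until a fixpoint) by a single left-to-right pass with a stack that cancels a reacting pair the moment it becomes adjacent.
-- outside the precondition, e.g. on part1(['ba', 'BA', '', '', 'ba', 'ba']): A returns 2, B returns 0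
import Mathlib
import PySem

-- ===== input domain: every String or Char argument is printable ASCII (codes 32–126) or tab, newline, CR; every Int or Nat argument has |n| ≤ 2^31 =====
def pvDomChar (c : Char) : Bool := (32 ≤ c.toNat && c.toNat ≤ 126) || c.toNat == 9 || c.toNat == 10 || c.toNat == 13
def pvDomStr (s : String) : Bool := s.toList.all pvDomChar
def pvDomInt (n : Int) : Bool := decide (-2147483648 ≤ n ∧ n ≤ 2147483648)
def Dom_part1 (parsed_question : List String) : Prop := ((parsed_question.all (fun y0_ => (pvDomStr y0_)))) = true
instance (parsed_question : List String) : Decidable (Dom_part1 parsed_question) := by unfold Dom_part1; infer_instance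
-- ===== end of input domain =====

-- B replaces A's repeated quadratic mark-and-pop passes by one left-to-right stack pass.
-- The claim is about the RETURN value only: the Python A mutates its argument (pops from it), B does not.

-- ===== PORT A =====
def pvLc : String := "abcdefghijklmnopqrstuvwxyz"   -- string.ascii_lowercase

-- body of A's `for i in range(len(parsed_question) - 1)` loop (pq is the current list)
def pvBody (pq : List String) (to_pop : List Int) (i : Int) : List Int :=
  let left := PySem.List.pyGetD pq i ""          -- parsed_question[i]; i is always a valid index here
  let right := PySem.List.pyGetD pq (i + 1) ""   -- parsed_question[i + 1]
  if PySem.Str.isIn left pvLc ∧ PySem.Str.upper left == right then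
    if ¬ to_pop.contains i ∧ ¬ to_pop.contains (i + 1) then to_pop ++ [i, i + 1] else to_pop
  else if ¬ PySem.Str.isIn left pvLc ∧ PySem.Str.lower left == right then
    if ¬ to_pop.contains i ∧ ¬ to_pop.contains (i + 1) then to_pop ++ [i, i + 1] else to_pop
  else to_pop

-- one full scan building `to_pop`
def part1Pass (pq : List String) : List Int :=
  (PySem.List.pyRange 0 ((pq.length : Int) - 1) 1).foldl (pvBody pq) []

-- `parsed_question.pop(i)`; the index is always valid when this is reached
def pvPopBody (l : List String) (i : Int) : List String :=
  match PySem.List.pop? l i with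
  | some (_, rest) => rest
  | none => l

-- A's `while True` loop; the fuel only makes the recursion total (an iteration with a
-- non-empty to_pop shortens the list, so fuel = length + 1 is never exhausted)
def part1Go : List String → Nat → Int
  | _, 0 => 0
  | pq, fuel + 1 =>
    let to_pop := part1Pass pq
    if to_pop = [] then (pq.length : Int)
    else
      let sorted_pop := PySem.List.sorted to_pop (fun x => x) true   -- to_pop.sort(reverse=True)
      let pq' := sorted_pop.foldl pvPopBody pq
      part1Go pq' fuel

def part1 (parsed_question : List String) : Int :=
  part1Go parsed_question (parsed_question.length + 1)

-- ===== PORT B =====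
-- Source B's reaction test: does the unit on top of the stack react with the incoming unit?
def pvReacts (left right : String) : Bool :=
  if PySem.Str.isIn left pvLc then PySem.Str.upper left == right
  else PySem.Str.lower left == right

-- body of Source B's single loop: pop the reacting top, otherwise push
def pvAltBody (stack : List String) (unit : String) : List String :=
  if stack ≠ [] ∧ pvReacts (PySem.List.pyGetD stack (-1) "") unit = true then
    match PySem.List.pop? stack (-1) with    -- stack.pop()
    | some (_, rest) => rest
    | none => stack
  else stack ++ [unit]

def part1_alt (parsed_question : List String) : Int :=
  ((parsed_question.foldl pvAltBody []).length : Int)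

-- ===== PRECONDITION & SPEC =====
-- the reaction-partner map of the code: bar(x) = x.upper() if x in ascii_lowercase else x.lower()
def pvBar (x : String) : String :=
  if PySem.Str.isIn x pvLc then PySem.Str.upper x else PySem.Str.lower x

-- Pre_ excludes lists containing a unit x whose partner map is not involutive (bar(bar x) ≠ x,
-- e.g. 'aB' or 'BA'): on such units the pairwise reaction rewriting is non-confluent, so the
-- surviving residue depends on the accidental order in which passes remove pairs and neither
-- program's value is canonical (the puzzle's units are single letters, which all satisfy it).
def Pre_part1 (parsed_question : List String) : Prop :=
  ∀ x ∈ parsed_question, pvBar (pvBar x) = x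
instance (parsed_question : List String) : Decidable (Pre_part1 parsed_question) := by
  unfold Pre_part1; infer_instance

def pvWitness_part1 : List String := ["d", "a", "A", "b", "c", "C", "B", "D"]

def Spec_part1 (parsed_question : List String) (out : Int) : Prop := out = part1_alt parsed_question
instance (parsed_question : List String) (out : Int) : Decidable (Spec_part1 parsed_question out) := by unfold Spec_part1; infer_instance

-- ===== CLAIM (what is proved, stated in full; the proofs are below) =====
def Claim_equal_part1 : Prop := ∀ (parsed_question : List String), Dom_part1 parsed_question → Pre_part1 parsed_question → Spec_part1 parsed_question (part1 parsed_question)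

-- ===== LEMMAS AND PROOFS =====
def pvStep (st : List String) (u : String) : List String :=
  match st with
  | [] => [u]
  | t :: r => if pvReacts t u then r else u :: t :: r

def pvGood (st : List String) : Prop := List.IsChain (fun a b => pvReacts b a = false) st

lemma mem_step (st : List String) (u x : String) (h : x ∈ pvStep st u) : x ∈ st ∨ x = u := by
  match st with
  | [] => simp [pvStep] at h; tauto
  | t :: r =>
    by_cases hr : pvReacts t u <;> simp only [pvStep, hr, if_pos, if_neg, Bool.not_eq_true] at h <;>
      simp only [List.mem_cons] at * <;> tauto

lemma pvReacts_eq_bar (l r : String) : pvReacts l r = (pvBar l == r) := by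
  unfold pvReacts pvBar; split_ifs <;> rfl

def pvRun (st : List String) (l : List String) : List String := l.foldl pvStep st

lemma run_cancel (st : List String) (x y : String) (hxy : pvReacts x y = true)
    (hg : pvGood st) (hinv : ∀ a ∈ st, pvBar (pvBar a) = a) :
    pvStep (pvStep st x) y = st := by
  match st with
  | [] => simp [pvStep, hxy]
  | t :: r =>
    by_cases htx : pvReacts t x
    · have hx : pvBar t = x := by rw [pvReacts_eq_bar] at htx; exact eq_of_beq htx
      have hy : pvBar x = y := by rw [pvReacts_eq_bar] at hxy; exact eq_of_beq hxy
      have hyt : y = t := by rw [← hy, ← hx, hinv t (by simp)]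
      subst hyt
      match r with
      | [] => simp [pvStep, htx]
      | t2 :: r2 =>
        have h2 : pvReacts t2 y = false := (List.isChain_cons_cons.mp hg).1
        simp [pvStep, htx, h2]
    · simp only [pvStep, htx, if_neg, Bool.not_eq_true]
      simp [hxy]

lemma good_step (st : List String) (u : String) (h : pvGood st) : pvGood (pvStep st u) := by
  match st with
  | [] => simp [pvStep, pvGood]
  | t :: r =>
    by_cases hr : pvReacts t u
    · simpa [pvStep, hr, pvGood] using h.tail
    · simp only [pvStep, hr, if_neg, Bool.not_eq_true]
      simp only [pvGood, List.isChain_cons_cons] at *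
      exact ⟨by simpa using hr, h⟩

def pvGreedy : List String → List String
  | [] => []
  | [x] => [x]
  | x :: y :: r => if pvReacts x y then pvGreedy r else x :: pvGreedy (y :: r)

lemma run_greedy : ∀ (l st : List String), pvGood st → (∀ a ∈ st, pvBar (pvBar a) = a) →
    (∀ a ∈ l, pvBar (pvBar a) = a) → pvRun st (pvGreedy l) = pvRun st l := by
  intro l
  induction l using pvGreedy.induct with
  | case1 => intro st _ _ _; rfl
  | case2 x => intro st _ _ _; rfl
  | case3 x y r hxy ih =>
    intro st hg hinv hl
    have hrhs : pvRun st (x :: y :: r) = pvRun st r := by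
      show pvRun (pvStep (pvStep st x) y) r = pvRun st r
      rw [run_cancel st x y hxy hg hinv]
    rw [pvGreedy, if_pos hxy, hrhs]
    exact ih st hg hinv (fun a ha => hl a (by simp [ha]))
  | case4 x y r hxy ih =>
    intro st hg hinv hl
    rw [pvGreedy, if_neg hxy]
    show pvRun (pvStep st x) (pvGreedy (y :: r)) = pvRun st (x :: y :: r)
    rw [ih (pvStep st x) (good_step st x hg)
      (fun a ha => by rcases mem_step st x a ha with h | h
                      · exact hinv a h
                      · exact h ▸ hl x (by simp))
      (fun a ha => hl a (by simp [List.mem_cons] at ha ⊢; tauto))]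
    rfl

lemma run_noreact : ∀ (l : List String) (t : String) (r : List String),
    List.IsChain (fun a b => pvReacts a b = false) (t :: l) →
    pvRun (t :: r) l = l.reverse ++ t :: r := by
  intro l
  induction l with
  | nil => intro t r _; rfl
  | cons u l ih =>
    intro t r h
    have h1 : pvReacts t u = false := (List.isChain_cons_cons.mp h).1
    show pvRun (pvStep (t :: r) u) l = (u :: l).reverse ++ t :: r
    rw [show pvStep (t :: r) u = u :: t :: r by simp [pvStep, h1]]
    rw [ih u (t :: r) (List.isChain_cons_cons.mp h).2]
    simp

lemma run_chain_length (l : List String) (h : List.IsChain (fun a b => pvReacts a b = false) l) :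
    (pvRun [] l).length = l.length := by
  match l with
  | [] => rfl
  | t :: l' =>
    show (pvRun (pvStep [] t) l').length = _
    rw [show pvStep [] t = [t] from rfl, run_noreact l' t [] h]
    simp

def pvMarksF : List String → Int → Bool → List Int
  | [], _, _ => []
  | [_], _, _ => []
  | x :: y :: r, k, b =>
    if pvReacts x y = true ∧ b = false then k :: (k + 1) :: pvMarksF (y :: r) (k + 1) true
    else pvMarksF (y :: r) (k + 1) false

lemma marksF_true : ∀ (x : String) (r : List String) (k : Int),
    pvMarksF (x :: r) k true = pvMarksF r (k + 1) false := by
  intro x r k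
  match r with
  | [] => rfl
  | y :: r' => simp [pvMarksF]

lemma marksF_lb : ∀ (r : List String) (k : Int) (b : Bool) (j : Int),
    j ∈ pvMarksF r k b → (if b then k + 1 else k) ≤ j := by
  intro r
  induction r with
  | nil => intro k b j h; simp [pvMarksF] at h
  | cons x r ih =>
    intro k b j h
    match r with
    | [] => simp [pvMarksF] at h
    | y :: r' =>
      rw [pvMarksF] at h
      split_ifs at h with hc
      · rcases List.mem_cons.mp h with rfl | h
        · simp [hc.2]
        · rcases List.mem_cons.mp h with rfl | h
          · simp [hc.2]
          · have := ih (k + 1) true j h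
            simp at this ⊢; split_ifs <;> omega
      · have := ih (k + 1) false j h
        simp at this ⊢; split_ifs <;> omega

lemma marksF_pairwise : ∀ (r : List String) (k : Int) (b : Bool),
    (pvMarksF r k b).Pairwise (· < ·) := by
  intro r
  induction r with
  | nil => intro k b; simp [pvMarksF]
  | cons x r ih =>
    intro k b
    match r with
    | [] => simp [pvMarksF]
    | y :: r' =>
      rw [pvMarksF]
      split_ifs with hc
      · refine List.Pairwise.cons ?_ (List.Pairwise.cons ?_ (ih (k + 1) true))
        · intro j hj
          rcases List.mem_cons.mp hj with rfl | hj
          · omega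
          · have := marksF_lb (y :: r') (k + 1) true j hj
            simp at this; omega
        · intro j hj
          have := marksF_lb (y :: r') (k + 1) true j hj
          simp at this; omega
      · exact ih (k + 1) false

lemma greedy_length_le : ∀ l : List String, (pvGreedy l).length ≤ l.length := by
  intro l
  induction l using pvGreedy.induct with
  | case1 => simp [pvGreedy]
  | case2 x => simp [pvGreedy]
  | case3 x y r hxy ih => rw [pvGreedy, if_pos hxy]; simp; omega
  | case4 x y r hxy ih => rw [pvGreedy, if_neg hxy]; simp at ih ⊢; omega

lemma mem_greedy : ∀ (l : List String) (x : String), x ∈ pvGreedy l → x ∈ l := by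
  intro l
  induction l using pvGreedy.induct with
  | case1 => simp [pvGreedy]
  | case2 x => simp [pvGreedy]
  | case3 x y r hxy ih =>
    intro a ha
    rw [pvGreedy, if_pos hxy] at ha
    simp [ih a ha]
  | case4 x y r hxy ih =>
    intro a ha
    rw [pvGreedy, if_neg hxy] at ha
    rcases List.mem_cons.mp ha with rfl | ha
    · simp
    · simp [ih a ha]

lemma marksF_nil_chain : ∀ (r : List String) (k : Int),
    pvMarksF r k false = [] → List.IsChain (fun a b => pvReacts a b = false) r := by
  intro r
  induction r using pvGreedy.induct with
  | case1 => intro k _; simp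
  | case2 x => intro k _; simp
  | case3 x y r hxy ih =>
    intro k h
    rw [pvMarksF, if_pos ⟨hxy, rfl⟩] at h
    simp at h
  | case4 x y r hxy ih =>
    intro k h
    rw [pvMarksF, if_neg (by simp [hxy])] at h
    exact List.isChain_cons_cons.mpr ⟨by simpa using hxy, ih (k + 1) h⟩

lemma greedy_length_lt : ∀ (l : List String) (k : Int),
    pvMarksF l k false ≠ [] → (pvGreedy l).length < l.length := by
  intro l
  induction l using pvGreedy.induct with
  | case1 => intro k h; simp [pvMarksF] at h
  | case2 x => intro k h; simp [pvMarksF] at h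
  | case3 x y r hxy ih =>
    intro k h
    rw [pvGreedy, if_pos hxy]
    have := greedy_length_le r
    simp; omega
  | case4 x y r hxy ih =>
    intro k h
    rw [pvMarksF, if_neg (by simp [hxy])] at h
    have := ih (k + 1) h
    rw [pvGreedy, if_neg hxy]
    simp at this ⊢; omega

lemma erase_at_append : ∀ (P : List String) (x : String) (T : List String),
    (P ++ x :: T).eraseIdx P.length = P ++ T := by
  intro P
  induction P with
  | nil => intro x T; simp
  | cons a P ih => intro x T; simp [ih]

lemma popBody_append (P : List String) (x : String) (T : List String) :
    pvPopBody (P ++ x :: T) (P.length : Int) = P ++ T := by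
  unfold pvPopBody
  rw [PySem.List.pop?_natCast (P ++ x :: T) P.length (by simp)]
  simp [erase_at_append]

lemma pop_marks : ∀ (r pre : List String),
    ((pvMarksF r (pre.length : Int) false).reverse).foldl pvPopBody (pre ++ r) = pre ++ pvGreedy r := by
  intro r
  induction r using pvGreedy.induct with
  | case1 => intro pre; simp [pvMarksF, pvGreedy]
  | case2 x => intro pre; simp [pvMarksF, pvGreedy]
  | case3 x y r hxy ih =>
    intro pre
    rw [pvMarksF, if_pos ⟨hxy, rfl⟩, marksF_true]
    have hc2 : (pre.length : Int) + 1 + 1 = (((pre ++ [x, y]).length : Int)) := by simp; ring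
    rw [List.reverse_cons, List.reverse_cons, List.foldl_append, List.foldl_append]
    rw [show pre ++ x :: y :: r = (pre ++ [x, y]) ++ r by simp, hc2, ih (pre ++ [x, y])]
    rw [show (pre ++ [x, y]) ++ pvGreedy r = (pre ++ [x]) ++ y :: pvGreedy r by simp]
    simp only [List.foldl_cons, List.foldl_nil]
    rw [show ((pre.length : Int) + 1) = (((pre ++ [x]).length : Int)) by simp]
    rw [popBody_append (pre ++ [x]) y (pvGreedy r)]
    rw [show (pre ++ [x]) ++ pvGreedy r = pre ++ x :: pvGreedy r by simp]
    rw [popBody_append pre x (pvGreedy r)]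
    rw [pvGreedy, if_pos hxy]
  | case4 x y r hxy ih =>
    intro pre
    rw [pvMarksF, if_neg (by simp [hxy])]
    rw [show (pre.length : Int) + 1 = (((pre ++ [x]).length : Int)) by simp]
    rw [show pre ++ x :: y :: r = (pre ++ [x]) ++ y :: r by simp, ih (pre ++ [x])]
    rw [pvGreedy, if_neg hxy]
    simp

lemma pvBody_eq (pq : List String) (tp : List Int) (i : Int) :
    pvBody pq tp i =
      if pvReacts (PySem.List.pyGetD pq i "") (PySem.List.pyGetD pq (i + 1) "") = true
          ∧ tp.contains i = false ∧ tp.contains (i + 1) = false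
      then tp ++ [i, i + 1] else tp := by
  unfold pvBody pvReacts
  by_cases h : PySem.Str.isIn (PySem.List.pyGetD pq i "") pvLc = true <;>
    simp only [h] <;> split_ifs <;> simp_all

lemma getD_append_len : ∀ (P : List String) (x : String) (T : List String) (d : String),
    (P ++ x :: T).getD P.length d = x := by
  intro P x T d; simp

lemma pass_fold : ∀ (r pre : List String) (tp : List Int),
    (∀ j ∈ tp, j ≤ (pre.length : Int)) →
    (PySem.List.pyRange (pre.length : Int) (((pre ++ r).length : Int) - 1) 1).foldl (pvBody (pre ++ r)) tp
      = tp ++ pvMarksF r (pre.length : Int) (tp.contains (pre.length : Int)) := by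
  intro r
  induction r with
  | nil =>
    intro pre tp _
    rw [PySem.List.pyRange_one_eq_nil (by simp)]
    simp [pvMarksF]
  | cons x rest ih =>
    intro pre tp htp
    match rest with
    | [] =>
      rw [PySem.List.pyRange_one_eq_nil (by simp)]
      simp [pvMarksF]
    | y :: r'' =>
      rw [PySem.List.pyRange_one_cons (by simp; omega)]
      rw [List.foldl_cons, pvBody_eq]
      have hleft : PySem.List.pyGetD (pre ++ x :: y :: r'') (pre.length : Int) "" = x := by
        rw [PySem.List.pyGetD_natCast, getD_append_len]
      have hright : PySem.List.pyGetD (pre ++ x :: y :: r'') ((pre.length : Int) + 1) "" = y := by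
        rw [show ((pre.length : Int) + 1) = (((pre ++ [x]).length : Nat) : Int) by simp,
          PySem.List.pyGetD_natCast,
          show pre ++ x :: y :: r'' = (pre ++ [x]) ++ y :: r'' by simp,
          getD_append_len]
      have hnext : tp.contains ((pre.length : Int) + 1) = false := by
        by_contra hc
        have : ((pre.length : Int) + 1) ∈ tp := by
          simp only [Bool.not_eq_false] at hc
          exact List.contains_iff_mem.mp hc
        have := htp _ this
        omega
      rw [hleft, hright, hnext]
      set k : Int := (pre.length : Int) with hk
      by_cases hm : pvReacts x y = true ∧ tp.contains k = false
      · rw [if_pos ⟨hm.1, hm.2, rfl⟩]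
        have hpre1 : k + 1 = (((pre ++ [x]).length : Nat) : Int) := by simp [hk]
        have hstep := ih (pre ++ [x]) (tp ++ [k, k + 1])
          (by intro j hj
              rcases List.mem_append.mp hj with hj | hj
              · have := htp _ hj; simp [hk] at this ⊢; omega
              · simp [hk] at hj ⊢; rcases hj with rfl | rfl <;> omega)
        rw [show (pre ++ [x]) ++ y :: r'' = pre ++ x :: y :: r'' by simp] at hstep
        rw [← hpre1] at hstep
        rw [hstep]
        have hcont : (tp ++ [k, k + 1]).contains (k + 1) = true := by
          simp
        rw [hcont, pvMarksF, if_pos ⟨hm.1, hm.2⟩]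
        simp
      · rw [if_neg (by tauto)]
        have hpre1 : k + 1 = (((pre ++ [x]).length : Nat) : Int) := by simp [hk]
        have hstep := ih (pre ++ [x]) tp
          (by intro j hj; have := htp _ hj; simp [hk] at this ⊢; omega)
        rw [show (pre ++ [x]) ++ y :: r'' = pre ++ x :: y :: r'' by simp] at hstep
        rw [← hpre1] at hstep
        rw [hstep]
        have hcont : tp.contains (k + 1) = false := hnext
        rw [hcont, pvMarksF, if_neg (by tauto)]

lemma pass_eq (pq : List String) : part1Pass pq = pvMarksF pq 0 false := by
  have := pass_fold pq [] [] (by simp)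
  simpa using this

lemma sorted_marks (pq : List String) :
    PySem.List.sorted (pvMarksF pq 0 false) (fun x => x) true = (pvMarksF pq 0 false).reverse := by
  refine PySem.List.sorted_rev_eq_of_perm_of_pairwise_gt _ _ _ (List.reverse_perm _) ?_
  exact List.pairwise_reverse.mpr (marksF_pairwise pq 0 false)

lemma part1Go_succ (pq : List String) (fuel : Nat) : part1Go pq (fuel + 1) =
    if part1Pass pq = [] then (pq.length : Int)
    else part1Go ((PySem.List.sorted (part1Pass pq) (fun x => x) true).foldl pvPopBody pq) fuel := rfl

lemma go_eq : ∀ (fuel : Nat) (pq : List String), pq.length < fuel →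
    (∀ a ∈ pq, pvBar (pvBar a) = a) →
    part1Go pq fuel = ((pvRun [] pq).length : Int) := by
  intro fuel
  induction fuel with
  | zero => intro pq h _; omega
  | succ fuel ih =>
    intro pq hlen hinv
    rw [part1Go_succ, pass_eq]
    by_cases h0 : pvMarksF pq 0 false = []
    · rw [if_pos h0, run_chain_length pq (marksF_nil_chain pq 0 h0)]
    · rw [if_neg h0, sorted_marks]
      have hpop := pop_marks pq []
      simp only [List.length_nil, Nat.cast_zero, List.nil_append] at hpop
      rw [hpop]
      rw [ih (pvGreedy pq) (by have := greedy_length_lt pq 0 h0; omega)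
        (fun a ha => hinv a (mem_greedy pq a ha))]
      rw [run_greedy pq [] (by simp [pvGood]) (by simp) hinv]

lemma estep_rev (T : List String) (u : String) :
    pvAltBody T.reverse u = (pvStep T u).reverse := by
  match T with
  | [] => simp [pvAltBody, pvStep]
  | t :: r =>
    have hne : (t :: r).reverse ≠ [] := by simp
    have hget : PySem.List.pyGetD (t :: r).reverse (-1) "" = t := by
      rw [PySem.List.pyGetD_neg_ofNat _ 1 "" (by norm_num) (by simp)]
      simp
    have hpop : PySem.List.pop? (t :: r).reverse (-1) = some (t, r.reverse) := by
      rw [show (t :: r).reverse = r.reverse ++ [t] by simp]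
      exact PySem.List.pop?_last r.reverse t
    by_cases hr : pvReacts t u
    · rw [pvAltBody, if_pos ⟨hne, by rw [hget]; exact hr⟩, hpop]
      simp [pvStep, hr]
    · rw [pvAltBody, if_neg (by rw [hget]; simp [hr])]
      simp [pvStep, hr]

lemma foldl_alt_rev : ∀ (l T : List String),
    l.foldl pvAltBody T.reverse = (l.foldl pvStep T).reverse := by
  intro l
  induction l with
  | nil => intro T; rfl
  | cons x l ih => intro T; rw [List.foldl_cons, List.foldl_cons, estep_rev, ih]

lemma alt_eq (pq : List String) : part1_alt pq = ((pvRun [] pq).length : Int) := by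
  unfold part1_alt pvRun
  rw [show ([] : List String) = ([] : List String).reverse from rfl, foldl_alt_rev]
  simp

-- ===== VERDICT (by name: the statement is the Claim_ definition above) =====
theorem part1_spec : Claim_equal_part1 := by
  intro pq _ hpre
  show part1 pq = part1_alt pq
  rw [alt_eq, part1, go_eq (pq.length + 1) pq (by omega) hpre]
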